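-- pv_equiv track=rewrite | github.com/okulovsky/yo_ds | yo_fluq_ds/_fluq/pandas/_stratify.py | _generate
-- ===== SOURCE A (Python) =====
-- def _generate(item_counts):
--     '''
--     item_counts is a list of counts of "types" of items. E.g., [3, 1, 0, 2] represents
--     a list containing [1, 1, 1, 2, 4, 4] (3 types of items/distinct values). Generate
--     a new list with evenly spaced values.
--     '''
--     # Sort number of occurrences by decreasing value.
--     item_counts.sort(reverse=True)
--     # Count the total elements in the final list.
--     unplaced = sum(item_counts)
--     # Create the final list.
--     placements = [None] * unplaced
--
--     # For each type of item, place it into the list item_count times.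
--     for item_type, item_count in enumerate(item_counts):
--         # The number of times the item has already been placed
--         instance = 0
--         # Evenly divide the item amongst the remaining unused spaces, starting with
--         # the first unused space encountered.
--         # blank_count is the number of unused spaces seen so far and is reset for each
--         # item type.
--         blank_count = -1
--         for position in range(len(placements)):
--             if placements[position] is None:
--                 blank_count += 1
--                 # Use an anti-aliasing technique to prevent bunching of values.
--                 if blank_count * item_count // unplaced == instance:
--                     placements[position] = item_type
--                     instance += 1
--         # Update the count of number of unplaced items.
--         unplaced -= item_count
--
--     return placements
-- ===== SOURCE B (Python) =====
-- def _generate(item_counts):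
--     # Free-position-list algorithm (also sorts item_counts in place, descending,
--     # like A; the return value is the same).  Instead of re-scanning the whole
--     # placement array and counting blanks for every type, keep the list of still
--     # free positions; each type picks its count evenly spaced free slots directly
--     # by order statistic (free[ceil(i*unused/count)]) and the picked slots are
--     # removed from the free list in one filter pass.
--     item_counts.sort(reverse=True)
--     total = sum(item_counts)
--     result = [None] * total
--     free = list(range(total))
--     unused = total
--     for item_type, count in enumerate(item_counts):
--         if unused <= 0:
--             break
--         ranks = [-((-i * unused) // count) for i in range(count)]
--         for r in ranks:
--             result[free[r]] = item_type
--         chosen = set(ranks)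
--         free = [p for j, p in enumerate(free) if j not in chosen]
--         unused -= count
--     return result
-- ===== Notes on version B (the rewrite author's own statement) =====
-- stated objective: alternative
-- what changed: A re-scans the whole placement array for every type, testing each cell for None and doing an anti-aliasing floor division at every blank; B never rescans the placements: it keeps an explicit shrinking list of free positions, picks each type's evenly spaced slots directly by order statistic (free[ceil(i*unused/count)]) and deletes the picked indices from the free list in one filter pass.
-- outside the precondition, e.g. on _generate([5, -3]): A returns [0, 1], B raises IndexError
import Mathlib
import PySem

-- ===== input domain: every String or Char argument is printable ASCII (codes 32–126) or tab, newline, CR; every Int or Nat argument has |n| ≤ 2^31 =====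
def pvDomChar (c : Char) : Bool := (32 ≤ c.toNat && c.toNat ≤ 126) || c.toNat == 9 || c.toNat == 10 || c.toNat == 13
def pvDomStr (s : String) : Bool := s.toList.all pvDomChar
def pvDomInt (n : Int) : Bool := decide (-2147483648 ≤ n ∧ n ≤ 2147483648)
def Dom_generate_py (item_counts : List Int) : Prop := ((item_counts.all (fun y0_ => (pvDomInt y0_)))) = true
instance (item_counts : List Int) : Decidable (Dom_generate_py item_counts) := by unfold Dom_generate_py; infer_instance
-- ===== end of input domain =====

-- B replaces A's repeated scan of the placement array (a None test per cell and an
-- anti-aliasing floor division per blank, for every type) by an explicit shrinking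
-- free-position list: each type picks its slots directly by order statistic
-- free[ceil(i*unused/count)] and the picked indices are removed in one filter pass.
-- Both Pythons sort item_counts in place (same side effect); the equivalence proved
-- is about the return value.

-- ===== PORT A =====
-- inner loop: 'for position in range(len(placements))', scanning/updating placements in order,
-- with state (instance, blank_count); ported as the structural recursion over the list.
def innerA (t c u inst bc : Int) : List (Option Int) → List (Option Int)
  | [] => []
  | none :: rest =>
      if PySem.Int.floordiv ((bc + 1) * c) u = inst then
        some t :: innerA t c u (inst + 1) (bc + 1) rest
      else
        none :: innerA t c u inst (bc + 1) rest
  | some x :: rest => some x :: innerA t c u inst bc rest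

-- outer loop: 'for item_type, item_count in enumerate(item_counts)' with running 'unplaced'
def outerA (t u : Int) : List Int → List (Option Int) → List (Option Int)
  | [], pl => pl
  | c :: cs, pl => outerA (t + 1) (u - c) cs (innerA t c u 0 (-1) pl)

def generate_py (item_counts : List Int) : List Int :=
  let sorted := PySem.List.sorted item_counts (fun x => x) true
  let unplaced := sorted.sum
  let placements := List.replicate unplaced.toNat (none : Option Int)
  (outerA 0 unplaced sorted placements).map (fun o => o.getD 0)

-- ===== PORT B =====
-- ranks = [-((-i * unused) // count) for i in range(count)], the ceiling divisions ceil(i*u/c)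
def ranksB (c u : Int) : List Int :=
  (PySem.List.pyRange 0 c 1).map (fun i => -(PySem.Int.floordiv (-(i * u)) c))

-- 'for r in ranks: result[free[r]] = item_type'; pyGetD/pySetD are exact for the
-- in-range indices this reaches under Pre_ (out of range Python raises: excluded by Pre_).
def placeB (t : Int) (free : List Int) (res : List (Option Int)) (ranks : List Int) : List (Option Int) :=
  ranks.foldl (fun acc r => PySem.List.pySetD acc (PySem.List.pyGetD free r 0) (some t)) res

-- 'free = [p for j, p in enumerate(free) if j not in chosen]'
def filterFree (free : List Int) (chosen : PySem.Set Int) : List Int :=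
  ((PySem.List.enumerate free 0).filter (fun jp => !(PySem.Set.contains chosen jp.1))).map (fun jp => jp.2)

-- 'for item_type, count in enumerate(item_counts): if unused <= 0: break; …'
def outerB (t u : Int) (free : List Int) (res : List (Option Int)) : List Int → List (Option Int)
  | [] => res
  | c :: cs =>
      if u ≤ 0 then res
      else
        let ranks := ranksB c u
        outerB (t + 1) (u - c) (filterFree free (PySem.Set.ofList ranks))
          (placeB t free res ranks) cs

def generate_py_alt (item_counts : List Int) : List Int :=
  let sorted := PySem.List.sorted item_counts (fun x => x) true
  let total := sorted.sum
  let result := List.replicate total.toNat (none : Option Int)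
  let free := PySem.List.pyRange 0 total 1
  (outerB 0 total free result sorted).map (fun o => o.getD 0)

-- ===== PRECONDITION & SPEC =====
-- Pre_ excludes infeasible count lists (some count, while blank cells remain, exceeding the
-- number of remaining blank cells — only possible with negative counts, outside the function's
-- natural domain of occurrence counts): there A's anti-aliasing test makes accidental
-- placements (and can even leave None cells in the returned list) while B's direct free-list
-- indexing raises IndexError. It admits every list of nonnegative counts, and more.
def Pre_generate_py (item_counts : List Int) : Prop :=
  ∀ l ∈ (PySem.List.sorted item_counts (fun x => x) true).tails,
    0 < l.headD 0 → 0 < l.sum → l.headD 0 ≤ l.sum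
instance (item_counts : List Int) : Decidable (Pre_generate_py item_counts) := by
  unfold Pre_generate_py; infer_instance
def pvWitness_generate_py : List Int := [3, 1, 0, 2]

def Spec_generate_py (item_counts : List Int) (out : List Int) : Prop := out = generate_py_alt item_counts
instance (item_counts : List Int) (out : List Int) : Decidable (Spec_generate_py item_counts out) := by unfold Spec_generate_py; infer_instance

-- ===== CLAIM (what is proved, stated in full; the proofs are below) =====
def Claim_equal_generate_py : Prop := ∀ (item_counts : List Int), Dom_generate_py item_counts → Pre_generate_py item_counts → Spec_generate_py item_counts (generate_py item_counts)

-- ===== LEMMAS AND PROOFS =====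

-- proof-only abstraction: A's inner pass seen as a merge of the sorted blank-rank list
-- against the placement list, with 'seen' counting blanks passed so far
def mergePl (t : Int) : List Int → Int → List (Option Int) → List (Option Int)
  | _, _, [] => []
  | rs, seen, some x :: rest => some x :: mergePl t rs seen rest
  | r :: rs, seen, none :: rest =>
      if r = seen then some t :: mergePl t rs (seen + 1) rest
      else none :: mergePl t (r :: rs) (seen + 1) rest
  | [], seen, none :: rest => none :: mergePl t [] (seen + 1) rest

-- number of still-blank cells
def nones (pl : List (Option Int)) : Nat := pl.countP (fun o => o.isNone)

-- the positions of the blank cells, in order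
def blanks : List (Option Int) → List Int
  | [] => []
  | none :: rest => 0 :: (blanks rest).map (· + 1)
  | some _ :: rest => (blanks rest).map (· + 1)

-- Nat-level closed forms
def ceilN (j u c : Nat) : Nat := (j * u + c - 1) / c
def instClosed (s c u : Nat) : Nat := if s = 0 then 0 else min c ((s - 1) * c / u + 1)

lemma ceil_le (j u c s : Nat) (hc : 0 < c) : ceilN j u c ≤ s ↔ j * u ≤ s * c := by
  unfold ceilN
  rw [Nat.div_le_iff_le_mul_add_pred hc, mul_comm c s]
  omega

lemma condA_iff (c u s : Nat) (hc : 0 < c) (hcu : c ≤ u) (hs : s < u) :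
    (s * c / u = instClosed s c u) ↔
    (instClosed s c u < c ∧ s = ceilN (instClosed s c u) u c) := by
  have hu : 0 < u := lt_of_lt_of_le hc hcu
  rcases Nat.eq_zero_or_pos s with hs0 | hs1
  · subst hs0
    simp only [instClosed, if_pos rfl, ceilN, Nat.zero_mul, Nat.zero_div]
    have : (c - 1) / c = 0 := Nat.div_eq_of_lt (by omega)
    simp [hc, this]
  · obtain ⟨s', rfl⟩ : ∃ s', s = s' + 1 := ⟨s - 1, by omega⟩
    set J := instClosed (s' + 1) c u with hJ
    have hJdef : J = min c (s' * c / u + 1) := by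
      rw [hJ, instClosed, if_neg (by omega)]; simp
    set qp := s' * c / u with hqp
    set q := (s' + 1) * c / u with hq
    have hq_qp : qp ≤ q := Nat.div_le_div_right (Nat.mul_le_mul_right _ (by omega))
    have hstep : q ≤ qp + 1 := by
      have h1 : (s' + 1) * c ≤ s' * c + u := by
        have heq : (s' + 1) * c = s' * c + c := by ring
        omega
      calc q ≤ (s' * c + u) / u := Nat.div_le_div_right h1
        _ = qp + 1 := Nat.add_div_right _ hu
    have hqc : q < c := by
      rw [hq, Nat.div_lt_iff_lt_mul hu]
      calc (s' + 1) * c < u * c := by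
            exact Nat.mul_lt_mul_of_lt_of_le hs (le_refl c) hc
        _ = c * u := Nat.mul_comm u c
    have h1 : ceilN J u c ≤ s' + 1 ↔ J ≤ q := by
      rw [ceil_le _ _ _ _ hc, hq, ← Nat.le_div_iff_mul_le hu]
    have h2 : ceilN J u c ≤ s' ↔ J ≤ qp := by
      rw [ceil_le _ _ _ _ hc, hqp, ← Nat.le_div_iff_mul_le hu]
    omega

lemma instClosed_succ (c u s : Nat) (hc : 0 < c) (hcu : c ≤ u) (hs : s < u) :
    instClosed (s + 1) c u = instClosed s c u + (if s * c / u = instClosed s c u then 1 else 0) := by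
  have hu : 0 < u := lt_of_lt_of_le hc hcu
  have hsucc : instClosed (s + 1) c u = min c (s * c / u + 1) := by
    rw [instClosed, if_neg (by omega)]; simp
  rcases Nat.eq_zero_or_pos s with hs0 | hs1
  · subst hs0
    have h0 : instClosed 0 c u = 0 := by rw [instClosed, if_pos rfl]
    rw [hsucc, h0, Nat.zero_mul, Nat.zero_div, if_pos rfl]
    omega
  · obtain ⟨s', rfl⟩ : ∃ s', s = s' + 1 := ⟨s - 1, by omega⟩
    have hJdef : instClosed (s' + 1) c u = min c (s' * c / u + 1) := by
      rw [instClosed, if_neg (by omega)]; simp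
    set qp := s' * c / u with hqp
    set q := (s' + 1) * c / u with hq
    have hq_qp : qp ≤ q := Nat.div_le_div_right (Nat.mul_le_mul_right _ (by omega))
    have hstep : q ≤ qp + 1 := by
      have h1 : (s' + 1) * c ≤ s' * c + u := by
        have heq : (s' + 1) * c = s' * c + c := by ring
        omega
      calc q ≤ (s' * c + u) / u := Nat.div_le_div_right h1
        _ = qp + 1 := Nat.add_div_right _ hu
    have hqc : q < c := by
      rw [hq, Nat.div_lt_iff_lt_mul hu]
      calc (s' + 1) * c < u * c := by
            exact Nat.mul_lt_mul_of_lt_of_le hs (le_refl c) hc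
        _ = c * u := Nat.mul_comm u c
    rw [hsucc, hJdef]
    split_ifs with hcond
    · omega
    · omega

lemma ceil_cast (j u c : Nat) (hc : 0 < c) :
    -(PySem.Int.floordiv (-((j : Int) * (u : Int))) (c : Int)) = ((ceilN j u c : Nat) : Int) := by
  have hcI : (0 : Int) < (c : Int) := by exact_mod_cast hc
  rw [PySem.Int.neg_floordiv_neg_eq_iff_of_pos hcI]
  constructor
  · -- ((ceilN j u c : Int) - 1) * c < j * u
    rcases Nat.eq_zero_or_pos (ceilN j u c) with h0 | h1
    · rw [h0]
      push_cast
      nlinarith [Int.natCast_nonneg (j * u), (by exact_mod_cast rfl : ((j : Int) * (u : Int)) = ((j * u : Nat) : Int))]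
    · have hnle : ¬ (ceilN j u c ≤ ceilN j u c - 1) := by omega
      rw [ceil_le _ _ _ _ hc, not_le] at hnle
      have : ((ceilN j u c - 1) * c : Nat) < (j * u : Nat) := hnle
      have hcast : ((ceilN j u c : Int) - 1) = ((ceilN j u c - 1 : Nat) : Int) := by
        push_cast [Nat.cast_sub h1]; ring
      rw [hcast]
      exact_mod_cast this
  · have : j * u ≤ ceilN j u c * c := (ceil_le j u c (ceilN j u c) hc).mp (le_refl _)
    exact_mod_cast this

lemma ranksB_eq (c u : Nat) (hc : 0 < c) :
    ranksB (c : Int) (u : Int) = (List.range c).map (fun j => ((ceilN j u c : Nat) : Int)) := by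
  unfold ranksB
  rw [PySem.List.pyRange_zero_natCast, List.map_map]
  refine List.map_congr_left ?_
  intro j hj
  simp only [Function.comp_apply]
  exact ceil_cast j u c hc

lemma inner_eq (t : Int) (c u : Nat) (hc : 0 < c) (hcu : c ≤ u) :
    ∀ (pl : List (Option Int)) (s j : Nat),
      s + nones pl ≤ u →
      j = instClosed s c u →
      innerA t (c : Int) (u : Int) (j : Int) ((s : Int) - 1) pl
        = mergePl t (((List.range c).map (fun i => ((ceilN i u c : Nat) : Int))).drop j) (s : Int) pl := by
  have hu : 0 < u := lt_of_lt_of_le hc hcu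
  intro pl
  induction pl with
  | nil =>
      intro s j _ _
      cases (((List.range c).map (fun i => ((ceilN i u c : Nat) : Int))).drop j) <;> rfl
  | cons o rest ih =>
      intro s j hle hj
      cases o with
      | some x =>
          have hn : nones (some x :: rest) = nones rest := by simp [nones, List.countP_cons]
          simp only [innerA, mergePl]
          rw [ih s j (by omega) hj]
      | none =>
          have hn : nones (none :: rest) = nones rest + 1 := by simp [nones, List.countP_cons]
          have hs : s < u := by omega
          have hstep : (((s : Int) - 1) + 1) * (c : Int) = ((s * c : Nat) : Int) := by
            push_cast; ring
          have hfd : PySem.Int.floordiv ((((s : Int) - 1) + 1) * (c : Int)) (u : Int)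
              = ((s * c / u : Nat) : Int) := by
            rw [hstep]; exact PySem.Int.floordiv_natCast (s * c) u
          have hcond := condA_iff c u s hc hcu hs
          rw [← hj] at hcond
          have hsucc := instClosed_succ c u s hc hcu hs
          rw [← hj] at hsucc
          rcases Nat.lt_or_ge j c with hjc | hjc
          · have hdrop : (((List.range c).map (fun i => ((ceilN i u c : Nat) : Int))).drop j)
                = ((ceilN j u c : Nat) : Int)
                  :: (((List.range c).map (fun i => ((ceilN i u c : Nat) : Int))).drop (j + 1)) := by
              rw [List.drop_eq_getElem_cons (by simpa using hjc)]
              congr 1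
              simp [hjc]
            rw [hdrop]
            by_cases hsel : s * c / u = j
            · have hA : PySem.Int.floordiv ((((s : Int) - 1) + 1) * (c : Int)) (u : Int) = (j : Int) := by
                rw [hfd]; exact_mod_cast hsel
              have hB : ((ceilN j u c : Nat) : Int) = (s : Int) := by
                have := (hcond.mp hsel).2
                exact_mod_cast this.symm
              simp only [innerA, mergePl, hA, if_pos rfl, hB]
              have hj' : j + 1 = instClosed (s + 1) c u := by rw [hsucc, if_pos hsel]
              have hrec := ih (s + 1) (j + 1) (by omega) hj'
              push_cast at hrec ⊢
              rw [show ((s : Int) - 1 + 1) = ((s : Int) + 1) - 1 by ring]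
              exact congrArg _ hrec
            · have hA : ¬ PySem.Int.floordiv ((((s : Int) - 1) + 1) * (c : Int)) (u : Int) = (j : Int) := by
                rw [hfd]; intro h; exact hsel (by exact_mod_cast h)
              have hB : ¬ ((ceilN j u c : Nat) : Int) = (s : Int) := by
                intro h
                exact hsel (hcond.mpr ⟨hjc, by exact_mod_cast h.symm⟩)
              simp only [innerA, mergePl, if_neg hA, if_neg hB]
              have hj' : j = instClosed (s + 1) c u := by rw [hsucc, if_neg hsel]; omega
              have hrec := ih (s + 1) j (by omega) hj'
              rw [hdrop] at hrec
              push_cast at hrec ⊢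
              rw [show ((s : Int) - 1 + 1) = ((s : Int) + 1) - 1 by ring]
              exact congrArg _ hrec
          · have hdrop : (((List.range c).map (fun i => ((ceilN i u c : Nat) : Int))).drop j) = [] :=
              List.drop_eq_nil_of_le (by simpa using hjc)
            have hqc : s * c / u < c := by
              rw [Nat.div_lt_iff_lt_mul hu]
              calc s * c < u * c := Nat.mul_lt_mul_of_lt_of_le hs (le_refl c) hc
                _ = c * u := Nat.mul_comm u c
            have hsel : ¬ s * c / u = j := by omega
            have hA : ¬ PySem.Int.floordiv ((((s : Int) - 1) + 1) * (c : Int)) (u : Int) = (j : Int) := by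
              rw [hfd]; intro h; exact hsel (by exact_mod_cast h)
            rw [hdrop]
            simp only [innerA, mergePl, if_neg hA]
            have hj' : j = instClosed (s + 1) c u := by rw [hsucc, if_neg hsel]; omega
            have hrec := ih (s + 1) j (by omega) hj'
            rw [hdrop] at hrec
            push_cast at hrec ⊢
            rw [show ((s : Int) - 1 + 1) = ((s : Int) + 1) - 1 by ring]
            exact congrArg _ hrec

lemma nones_mergePl (t : Int) :
    ∀ (pl : List (Option Int)) (rs : List Int) (s : Int),
      rs.Pairwise (· < ·) →
      (∀ r ∈ rs, s ≤ r ∧ r < s + (nones pl : Int)) →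
      (nones (mergePl t rs s pl) : Int) = (nones pl : Int) - rs.length := by
  intro pl
  induction pl with
  | nil =>
      intro rs s _ hb
      cases rs with
      | nil => simp [mergePl, nones]
      | cons r rs' =>
          exfalso
          have := hb r (by simp)
          simp [nones] at this
          omega
  | cons o rest ih =>
      intro rs s hp hb
      cases o with
      | some x =>
          have hn : nones (some x :: rest) = nones rest := by simp [nones, List.countP_cons]
          cases rs with
          | nil =>
              simp only [mergePl]
              have hrec := ih [] s List.Pairwise.nil (by simp)
              simp only [nones, List.countP_cons] at hrec ⊢
              simp at hrec ⊢
              omega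
          | cons r rs' =>
              simp only [mergePl]
              have hrec := ih (r :: rs') s hp (by simpa [hn] using hb)
              simp only [nones, List.countP_cons] at hrec ⊢
              simp at hrec ⊢
              omega
      | none =>
          have hn : nones (none :: rest) = nones rest + 1 := by simp [nones, List.countP_cons]
          cases rs with
          | nil =>
              simp only [mergePl]
              have hrec := ih [] (s + 1) List.Pairwise.nil (by simp)
              simp only [nones, List.countP_cons] at hrec ⊢
              simp at hrec ⊢
              omega
          | cons r rs' =>
              have hr := hb r (by simp)
              rw [hn] at hr
              simp only [mergePl]
              by_cases hrs : r = s
              · rw [if_pos hrs]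
                have hb' : ∀ r' ∈ rs', s + 1 ≤ r' ∧ r' < s + 1 + (nones rest : Int) := by
                  intro r' hr'
                  have h1 := List.rel_of_pairwise_cons hp hr'
                  have h2 := hb r' (by simp [hr'])
                  rw [hn] at h2
                  constructor
                  · omega
                  · push_cast at h2 ⊢; omega
                have hrec := ih rs' (s + 1) (List.Pairwise.of_cons hp) hb'
                simp only [nones, List.countP_cons] at hrec ⊢
                simp at hrec ⊢
                push_cast at hrec ⊢
                omega
              · rw [if_neg hrs]
                have hb' : ∀ r' ∈ (r :: rs'), s + 1 ≤ r' ∧ r' < s + 1 + (nones rest : Int) := by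
                  intro r' hr'
                  have h2 := hb r' hr'
                  rw [hn] at h2
                  have h4 : s + 1 ≤ r' := by
                    rcases List.mem_cons.mp hr' with heq | hmem
                    · omega
                    · have h5 := List.rel_of_pairwise_cons hp hmem
                      omega
                  constructor
                  · exact h4
                  · push_cast at h2 ⊢; omega
                have hrec := ih (r :: rs') (s + 1) hp hb'
                simp only [nones, List.countP_cons] at hrec ⊢
                simp at hrec ⊢
                push_cast at hrec ⊢
                omega

lemma mergePl_nil (t : Int) : ∀ (pl : List (Option Int)) (s : Int), mergePl t [] s pl = pl := by
  intro pl
  induction pl with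
  | nil => intro s; rfl
  | cons o rest ih =>
      intro s
      cases o with
      | none => simp only [mergePl]; rw [ih]
      | some x => simp only [mergePl]; rw [ih]

lemma innerA_of_no_none (t c u inst bc : Int) :
    ∀ pl : List (Option Int), nones pl = 0 → innerA t c u inst bc pl = pl := by
  intro pl
  induction pl generalizing inst bc with
  | nil => intro _; rfl
  | cons o rest ih =>
      intro h
      cases o with
      | none => simp [nones, List.countP_cons] at h
      | some x =>
          simp only [nones, List.countP_cons] at h
          simp only [innerA]
          rw [ih inst bc (by simpa [nones] using h)]

lemma ceil_mul_lt (j u c : Nat) (hc : 0 < c) : ceilN j u c * c < j * u + c := by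
  rcases Nat.eq_zero_or_pos (ceilN j u c) with h0 | h1
  · simp [h0]; omega
  · have hnle : ¬ (ceilN j u c ≤ ceilN j u c - 1) := by omega
    rw [ceil_le _ _ _ _ hc, not_le] at hnle
    have hmul : (ceilN j u c - 1) * c = ceilN j u c * c - c := Nat.sub_one_mul _ _
    have hge : c ≤ ceilN j u c * c := Nat.le_mul_of_pos_left c h1
    omega

lemma ceil_succ_lt (j u c : Nat) (hc : 0 < c) (hcu : c ≤ u) :
    ceilN j u c < ceilN (j + 1) u c := by
  have h1 := ceil_mul_lt j u c hc
  have h2 : ¬ (ceilN (j + 1) u c ≤ ceilN j u c) := by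
    rw [ceil_le _ _ _ _ hc, not_le]
    have : (j + 1) * u = j * u + u := by ring
    omega
  omega

lemma ceil_lt_u (j u c : Nat) (hc : 0 < c) (hcu : c ≤ u) (hj : j < c) :
    ceilN j u c < u := by
  have hu : 0 < u := lt_of_lt_of_le hc hcu
  have h1 : ceilN j u c ≤ u - 1 := by
    rw [ceil_le _ _ _ _ hc]
    have h2 : j * u ≤ (c - 1) * u := Nat.mul_le_mul_right u (by omega)
    have h3 : (c - 1) * u = c * u - u := Nat.sub_one_mul c u
    have h4 : (u - 1) * c = u * c - c := Nat.sub_one_mul u c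
    have h5 : c * u = u * c := Nat.mul_comm c u
    omega
  omega

lemma ranks_pairwise (c u : Nat) (hc : 0 < c) (hcu : c ≤ u) :
    ((List.range c).map (fun i => ((ceilN i u c : Nat) : Int))).Pairwise (· < ·) := by
  rw [List.pairwise_map]
  have hmono : StrictMono (fun i => ceilN i u c) :=
    strictMono_nat_of_lt_succ (fun n => ceil_succ_lt n u c hc hcu)
  exact (List.pairwise_lt_range).imp (fun h => by exact_mod_cast hmono h)

lemma sum_nonpos_of_nonpos (cs : List Int) (h : ∀ x ∈ cs, x ≤ 0) : cs.sum ≤ 0 := by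
  induction cs with
  | nil => simp
  | cons c cs ih =>
      have := h c (by simp)
      have := ih (fun x hx => h x (by simp [hx]))
      simp only [List.sum_cons]
      omega

lemma outerA_no_none (t u : Int) :
    ∀ (cs : List Int) (pl : List (Option Int)), nones pl = 0 → outerA t u cs pl = pl := by
  intro cs
  induction cs generalizing t u with
  | nil => intro pl _; rfl
  | cons c cs ih =>
      intro pl h
      show outerA (t + 1) (u - c) cs (innerA t c u 0 (-1) pl) = pl
      rw [innerA_of_no_none t c u 0 (-1) pl h, ih (t + 1) (u - c) pl h]

-- length and membership facts about blanks
lemma length_blanks : ∀ pl : List (Option Int), (blanks pl).length = nones pl := by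
  intro pl
  induction pl with
  | nil => rfl
  | cons o rest ih =>
      cases o <;> simp [blanks, nones, List.countP_cons, ih] <;> simp [nones] at ih <;> omega

lemma blanks_nonneg : ∀ (pl : List (Option Int)) (p : Int), p ∈ blanks pl → 0 ≤ p := by
  intro pl
  induction pl with
  | nil => intro p hp; simp [blanks] at hp
  | cons o rest ih =>
      intro p hp
      cases o with
      | none =>
          simp only [blanks, List.mem_cons, List.mem_map] at hp
          rcases hp with rfl | ⟨q, hq, rfl⟩
          · omega
          · have := ih q hq; omega
      | some x =>
          simp only [blanks, List.mem_map] at hp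
          rcases hp with ⟨q, hq, rfl⟩
          have := ih q hq; omega

-- pushing a fold of writes at positive positions under a cons
lemma foldl_set_cons (v x : Option Int) :
    ∀ (rs : List Int) (pos : Int → Int) (l : List (Option Int)),
      (∀ r ∈ rs, 0 ≤ pos r) →
      rs.foldl (fun acc r => PySem.List.pySetD acc (pos r + 1) v) (x :: l)
        = x :: rs.foldl (fun acc r => PySem.List.pySetD acc (pos r) v) l := by
  intro rs
  induction rs with
  | nil => intro pos l _; rfl
  | cons r rs ih =>
      intro pos l h
      have h0 : 0 ≤ pos r := h r (by simp)
      simp only [List.foldl_cons]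
      rw [PySem.List.pySetD_of_nonneg _ _ (by omega), PySem.List.pySetD_of_nonneg _ _ h0]
      have hT : (pos r + 1).toNat = (pos r).toNat + 1 := by omega
      rw [hT, List.set_cons_succ]
      exact ih pos _ (fun r' hr' => h r' (by simp [hr']))

-- indexing the shifted blank lists
lemma pyGetD_map_shift (L : List Int) (r s : Int) (h1 : s ≤ r) (h2 : r < s + L.length) :
    PySem.List.pyGetD (L.map (· + 1)) (r - s) 0 = PySem.List.pyGetD L (r - s) 0 + 1 := by
  rw [PySem.List.pyGetD_eq_getElem _ _ (by omega) (by simp; omega),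
      PySem.List.pyGetD_eq_getElem _ _ (by omega) (by omega)]
  simp

lemma pyGetD_cons_shift (L : List Int) (a : Int) (r s : Int) (h1 : s + 1 ≤ r) (h2 : r < s + 1 + L.length) :
    PySem.List.pyGetD (a :: L.map (· + 1)) (r - s) 0 = PySem.List.pyGetD L (r - (s + 1)) 0 + 1 := by
  rw [PySem.List.pyGetD_eq_getElem _ _ (by omega) (by simp; omega),
      PySem.List.pyGetD_eq_getElem _ _ (by omega) (by omega)]
  have hk : (r - s).toNat = (r - (s + 1)).toNat + 1 := by omega
  simp only [hk, List.getElem_cons_succ, List.getElem_map]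

lemma pyGetD_blanks_nonneg (L : List (Option Int)) (i : Int) (h0 : 0 ≤ i) (h1 : i < (nones L : Int)) :
    0 ≤ PySem.List.pyGetD (blanks L) i 0 := by
  rw [PySem.List.pyGetD_eq_getElem _ _ h0 (by rw [length_blanks]; omega)]
  exact blanks_nonneg L _ (List.getElem_mem _)

-- mergePl computed as B's fold of direct writes at the blank positions
lemma merge_eq_fold (t : Int) :
    ∀ (pl : List (Option Int)) (rs : List Int) (s : Int),
      rs.Pairwise (· < ·) →
      (∀ r ∈ rs, s ≤ r ∧ r < s + (nones pl : Int)) →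
      mergePl t rs s pl
        = rs.foldl (fun acc r => PySem.List.pySetD acc (PySem.List.pyGetD (blanks pl) (r - s) 0) (some t)) pl := by
  intro pl
  induction pl with
  | nil =>
      intro rs s _ hb
      cases rs with
      | nil => rfl
      | cons r rs' =>
          exfalso
          have := hb r (by simp)
          simp [nones] at this
          omega
  | cons o rest ih =>
      intro rs s hp hb
      cases o with
      | some x =>
          have hn : nones (some x :: rest) = nones rest := by simp [nones]
          show some x :: mergePl t rs s rest = _
          rw [PySem.List.foldl_congr_mem rs _
              (fun acc r => PySem.List.pySetD acc (PySem.List.pyGetD (blanks rest) (r - s) 0 + 1) (some t)) _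
              (fun acc r hr => by
                have h1 := hb r hr
                rw [hn] at h1
                show PySem.List.pySetD acc (PySem.List.pyGetD (blanks (some x :: rest)) (r - s) 0) (some t) = _
                rw [show blanks (some x :: rest) = (blanks rest).map (· + 1) from rfl,
                    pyGetD_map_shift (blanks rest) r s h1.1 (by rw [length_blanks]; omega)]),
             foldl_set_cons (some t) (some x) rs _ rest
              (fun r hr => pyGetD_blanks_nonneg rest (r - s) (by have := hb r hr; omega)
                (by have := hb r hr; rw [hn] at this; omega))]
          exact congrArg _ (ih rs s hp (by simpa [hn] using hb))
      | none =>
          have hn : nones (none :: rest) = nones rest + 1 := by simp [nones]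
          cases rs with
          | nil => rw [mergePl_nil]; rfl
          | cons r rs' =>
              have hr := hb r (by simp)
              rw [hn] at hr
              have hgt : ∀ r' ∈ rs', r < r' := fun r' h' => List.rel_of_pairwise_cons hp h'
              by_cases hrs : r = s
              · subst hrs
                have hstep : mergePl t (r :: rs') r (none :: rest) = some t :: mergePl t rs' (r + 1) rest := by
                  simp [mergePl]
                rw [hstep]
                simp only [List.foldl_cons]
                have hhead : PySem.List.pySetD (none :: rest)
                    (PySem.List.pyGetD (blanks (none :: rest)) (r - r) 0) (some t) = some t :: rest := by
                  rw [show blanks (none :: rest) = 0 :: (blanks rest).map (· + 1) from rfl]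
                  rw [sub_self, PySem.List.pyGetD_zero_cons, PySem.List.pySetD_of_nonneg _ _ (by omega)]
                  rfl
                rw [hhead]
                rw [PySem.List.foldl_congr_mem rs' _
                    (fun acc r' => PySem.List.pySetD acc
                      (PySem.List.pyGetD (blanks rest) (r' - (r + 1)) 0 + 1) (some t)) _
                    (fun acc r' hr' => by
                      have h1 := hb r' (by simp [hr'])
                      rw [hn] at h1
                      show PySem.List.pySetD acc (PySem.List.pyGetD (blanks (none :: rest)) (r' - r) 0) (some t) = _
                      rw [show blanks (none :: rest) = 0 :: (blanks rest).map (· + 1) from rfl,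
                          pyGetD_cons_shift (blanks rest) 0 r' r (hgt r' hr') (by rw [length_blanks]; push_cast; omega)]),
                   foldl_set_cons (some t) (some t) rs' _ rest
                    (fun r' hr' => pyGetD_blanks_nonneg rest (r' - (r + 1)) (by have := hgt r' hr'; omega)
                      (by have := hb r' (by simp [hr']); rw [hn] at this; omega))]
                refine congrArg _ (ih rs' (r + 1) (List.Pairwise.of_cons hp) ?_)
                intro r' hr'
                have h1 := hb r' (by simp [hr'])
                rw [hn] at h1
                exact ⟨hgt r' hr', by omega⟩
              · have hrgt : s < r := by omega
                have hstep : mergePl t (r :: rs') s (none :: rest) = none :: mergePl t (r :: rs') (s + 1) rest := by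
                  simp only [mergePl]
                  rw [if_neg hrs]
                rw [hstep]
                rw [PySem.List.foldl_congr_mem (r :: rs') _
                    (fun acc r' => PySem.List.pySetD acc
                      (PySem.List.pyGetD (blanks rest) (r' - (s + 1)) 0 + 1) (some t)) _
                    (fun acc r' hr' => by
                      have h1 := hb r' hr'
                      rw [hn] at h1
                      have hge : s + 1 ≤ r' := by
                        rcases List.mem_cons.mp hr' with rfl | hm
                        · omega
                        · have := hgt r' hm; omega
                      show PySem.List.pySetD acc (PySem.List.pyGetD (blanks (none :: rest)) (r' - s) 0) (some t) = _
                      rw [show blanks (none :: rest) = 0 :: (blanks rest).map (· + 1) from rfl,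
                          pyGetD_cons_shift (blanks rest) 0 r' s hge (by rw [length_blanks]; push_cast; omega)]),
                   foldl_set_cons (some t) none (r :: rs') _ rest
                    (fun r' hr' => by
                      have h1 := hb r' hr'
                      rw [hn] at h1
                      have hge : s + 1 ≤ r' := by
                        rcases List.mem_cons.mp hr' with rfl | hm
                        · omega
                        · have := hgt r' hm; omega
                      exact pyGetD_blanks_nonneg rest (r' - (s + 1)) (by omega) (by omega))]
                refine congrArg _ (ih (r :: rs') (s + 1) hp ?_)
                intro r' hr'
                have h1 := hb r' hr'
                rw [hn] at h1
                have hge : s + 1 ≤ r' := by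
                  rcases List.mem_cons.mp hr' with rfl | hm
                  · omega
                  · have := hgt r' hm; omega
                exact ⟨hge, by omega⟩

lemma enumerate_map {α β : Type} (f : α → β) :
    ∀ (l : List α) (s : Int),
      PySem.List.enumerate (l.map f) s = (PySem.List.enumerate l s).map (fun jp => (jp.1, f jp.2)) := by
  intro l
  induction l with
  | nil => intro s; simp [PySem.List.enumerate_nil]
  | cons a l ih => intro s; simp [PySem.List.enumerate_cons, ih]

lemma enumerate_fst_ge {α : Type} :
    ∀ (l : List α) (s : Int) (jp : Int × α), jp ∈ PySem.List.enumerate l s → s ≤ jp.1 := by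
  intro l
  induction l with
  | nil => intro s jp h; simp [PySem.List.enumerate_nil] at h
  | cons a l ih =>
      intro s jp h
      rw [PySem.List.enumerate_cons] at h
      rcases List.mem_cons.mp h with rfl | h
      · simp
      · have := ih (s + 1) jp h; omega

-- the surviving blank positions are the old ones whose rank is not selected
lemma blanks_merge (t : Int) :
    ∀ (pl : List (Option Int)) (rs : List Int) (s : Int),
      rs.Pairwise (· < ·) →
      (∀ r ∈ rs, s ≤ r ∧ r < s + (nones pl : Int)) →
      blanks (mergePl t rs s pl)
        = ((PySem.List.enumerate (blanks pl) s).filter (fun jp => !(rs.contains jp.1))).map (fun jp => jp.2) := by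
  intro pl
  induction pl with
  | nil =>
      intro rs s _ _
      cases rs <;> simp [mergePl, blanks, PySem.List.enumerate_nil]
  | cons o rest ih =>
      intro rs s hp hb
      cases o with
      | some x =>
          have hn : nones (some x :: rest) = nones rest := by simp [nones]
          show blanks (some x :: mergePl t rs s rest) = _
          rw [show blanks (some x :: rest) = (blanks rest).map (· + 1) from rfl,
              show blanks (some x :: mergePl t rs s rest) = (blanks (mergePl t rs s rest)).map (· + 1) from rfl,
              ih rs s hp (by simpa [hn] using hb), enumerate_map, List.filter_map, List.map_map, List.map_map]
          exact List.map_congr_left (fun jp _ => rfl)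
      | none =>
          have hn : nones (none :: rest) = nones rest + 1 := by simp [nones]
          have hble : blanks (none :: rest) = 0 :: (blanks rest).map (· + 1) := rfl
          cases rs with
          | nil =>
              rw [mergePl_nil]
              simp [PySem.List.map_snd_enumerate]
          | cons r rs' =>
              have hr := hb r (by simp)
              rw [hn] at hr
              have hgt : ∀ r' ∈ rs', r < r' := fun r' h' => List.rel_of_pairwise_cons hp h'
              by_cases hrs : r = s
              · subst hrs
                have hstep : mergePl t (r :: rs') r (none :: rest) = some t :: mergePl t rs' (r + 1) rest := by
                  simp [mergePl]
                rw [hstep, hble, PySem.List.enumerate_cons]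
                rw [List.filter_cons, if_neg (by simp)]
                rw [List.filter_congr (fun jp hjp => by
                      have hge := enumerate_fst_ge _ _ _ hjp
                      have hne : jp.1 ≠ r := by omega
                      show (!((r :: rs').contains jp.1)) = (!(rs'.contains jp.1))
                      simp [List.contains_cons, hne]),
                    enumerate_map, List.filter_map, List.map_map]
                rw [show blanks (some t :: mergePl t rs' (r + 1) rest)
                      = (blanks (mergePl t rs' (r + 1) rest)).map (· + 1) from rfl,
                    ih rs' (r + 1) (List.Pairwise.of_cons hp) (by
                      intro r' hr'
                      have h1 := hb r' (by simp [hr'])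
                      rw [hn] at h1
                      exact ⟨hgt r' hr', by omega⟩),
                    List.map_map]
                exact List.map_congr_left (fun jp _ => rfl)
              · have hrgt : s < r := by omega
                have hstep : mergePl t (r :: rs') s (none :: rest) = none :: mergePl t (r :: rs') (s + 1) rest := by
                  simp only [mergePl]
                  rw [if_neg hrs]
                rw [hstep, hble, PySem.List.enumerate_cons]
                have hsnot : s ∉ (r :: rs') := by
                  intro hmem
                  rcases List.mem_cons.mp hmem with rfl | hm
                  · omega
                  · have := hgt s hm; omega
                rw [List.filter_cons, if_pos (by simp [hsnot])]
                rw [show blanks (none :: mergePl t (r :: rs') (s + 1) rest)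
                      = 0 :: (blanks (mergePl t (r :: rs') (s + 1) rest)).map (· + 1) from rfl,
                    ih (r :: rs') (s + 1) hp (by
                      intro r' hr'
                      have h1 := hb r' hr'
                      rw [hn] at h1
                      have hge : s + 1 ≤ r' := by
                        rcases List.mem_cons.mp hr' with rfl | hm
                        · omega
                        · have := hgt r' hm; omega
                      exact ⟨hge, by omega⟩),
                    enumerate_map, List.filter_map, List.map_map]
                simp only [List.map_cons, List.map_map]
                exact congrArg _ (List.map_congr_left (fun jp _ => rfl))

-- blanks of the initial all-None list is the initial free list
lemma blanks_replicate (n : Nat) :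
    blanks (List.replicate n (none : Option Int)) = (List.range n).map Int.ofNat := by
  induction n with
  | zero => rfl
  | succ n ih =>
      rw [List.replicate_succ, show blanks (none :: List.replicate n (none : Option Int))
            = 0 :: (blanks (List.replicate n (none : Option Int))).map (· + 1) from rfl,
          ih, List.range_succ_eq_map]
      simp only [List.map_cons, List.map_map]
      refine congrArg _ (List.map_congr_left (fun k _ => ?_))
      simp [Function.comp, Int.ofNat_eq_natCast]

lemma outer_eq :
    ∀ (cs : List Int) (pl : List (Option Int)) (t : Int),
      cs.Pairwise (fun a b => b ≤ a) →
      (∀ l ∈ cs.tails, 0 < l.headD 0 → 0 < l.sum → l.headD 0 ≤ l.sum) →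
      (nones pl : Int) = max cs.sum 0 →
      outerA t cs.sum cs pl = outerB t cs.sum (blanks pl) pl cs := by
  intro cs
  induction cs with
  | nil => intro pl t _ _ _; rfl
  | cons ch cs ih =>
      intro pl t hpw hfeas hnones
      have htail : ∀ x ∈ cs, x ≤ ch := fun x hx => List.rel_of_pairwise_cons hpw hx
      have hfeas' : ∀ l ∈ cs.tails, 0 < l.headD 0 → 0 < l.sum → l.headD 0 ≤ l.sum := by
        intro l hl
        exact hfeas l (by rw [List.tails_cons]; simp [hl])
      have hsub : (ch :: cs).sum - ch = cs.sum := by simp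
      show outerA (t + 1) ((ch :: cs).sum - ch) cs (innerA t ch ((ch :: cs).sum) 0 (-1) pl)
        = outerB t ((ch :: cs).sum) (blanks pl) pl (ch :: cs)
      simp only [outerB]
      by_cases hle : (ch :: cs).sum ≤ 0
      · rw [if_pos hle]
        have hpl0 : nones pl = 0 := by
          have : (nones pl : Int) = 0 := by rw [hnones]; omega
          exact_mod_cast this
        rw [innerA_of_no_none t ch ((ch :: cs).sum) 0 (-1) pl hpl0,
            outerA_no_none (t + 1) ((ch :: cs).sum - ch) cs pl hpl0]
      · rw [if_neg hle]
        have hsumpos : 0 < (ch :: cs).sum := by omega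
        have hpos : 0 < ch := by
          by_contra h
          have : (ch :: cs).sum ≤ 0 :=
            sum_nonpos_of_nonpos _ (by
              intro x hx
              rcases List.mem_cons.mp hx with rfl | hx'
              · omega
              · have := htail x hx'; omega)
          omega
        have hch : 0 ≤ ch := le_of_lt hpos
        have hfeas0 : ch ≤ (ch :: cs).sum := by
          have := hfeas (ch :: cs) (by rw [List.tails_cons]; simp) (by simpa using hpos)
            (by simpa using hsumpos)
          simpa using this
        have hnones' : (nones pl : Int) = (ch :: cs).sum := by
          rw [hnones, max_eq_left (le_of_lt hsumpos)]
        set C := ch.toNat with hC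
        set U := ((ch :: cs).sum).toNat with hU
        have hchC : ch = (C : Int) := (Int.toNat_of_nonneg hch).symm
        have hUc : ((ch :: cs).sum) = (U : Int) := (Int.toNat_of_nonneg (le_of_lt hsumpos)).symm
        have hCpos : 0 < C := by omega
        have hCU : C ≤ U := by omega
        have hplU : nones pl = U := by
          have : ((nones pl : Int)) = ((U : Int)) := by rw [hnones', hUc]
          exact_mod_cast this
        set rankNats := (List.range C).map (fun i => ((ceilN i U C : Nat) : Int)) with hrankNats
        have h_ranks : ranksB ch ((ch :: cs).sum) = rankNats := by
          rw [hUc, hchC]; exact ranksB_eq C U hCpos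
        have hpair : rankNats.Pairwise (· < ·) := ranks_pairwise C U hCpos hCU
        have hbounds : ∀ r ∈ rankNats, (0 : Int) ≤ r ∧ r < 0 + (nones pl : Int) := by
          intro r hr
          rcases List.mem_map.mp hr with ⟨i, hi, rfl⟩
          have hiC : i < C := List.mem_range.mp hi
          have := ceil_lt_u i U C hCpos hCU hiC
          constructor
          · exact Int.natCast_nonneg _
          · rw [hplU]; push_cast; omega
        have hinner : innerA t ch ((ch :: cs).sum) 0 (-1) pl = mergePl t rankNats 0 pl := by
          rw [hUc, hchC]
          have h0 : (0 : Nat) = instClosed 0 C U := by simp [instClosed]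
          have := inner_eq t C U hCpos hCU pl 0 0 (by omega) h0
          simpa using this
        have hplace : placeB t (blanks pl) pl rankNats = mergePl t rankNats 0 pl := by
          rw [merge_eq_fold t pl rankNats 0 hpair hbounds]
          exact PySem.List.foldl_congr_mem rankNats _ _ pl (fun acc r _ => by rw [sub_zero])
        have hfree' : filterFree (blanks pl) (PySem.Set.ofList rankNats) = blanks (mergePl t rankNats 0 pl) := by
          rw [blanks_merge t pl rankNats 0 hpair hbounds]
          unfold filterFree
          rw [PySem.Set.ofList_eq_self_of_nodup _ (hpair.imp ne_of_lt)]
          exact congrArg _ (List.filter_congr (fun jp _ => by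
            rw [PySem.Set.contains_eq_listContains]))
        have hnonesrec : (nones (mergePl t rankNats 0 pl) : Int) = max cs.sum 0 := by
          rw [nones_mergePl t pl rankNats 0 hpair hbounds]
          rw [hnones', hUc, hrankNats]
          simp only [List.length_map, List.length_range]
          have h0 : (0 : Int) ≤ cs.sum := by omega
          rw [max_eq_left h0]
          omega
        rw [hsub, hinner, h_ranks, hplace, hfree']
        exact ih (mergePl t rankNats 0 pl) (t + 1) (List.Pairwise.of_cons hpw) hfeas' hnonesrec

-- ===== VERDICT (by name: the statement is the Claim_ definition above) =====
theorem generate_py_spec : Claim_equal_generate_py := by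
  intro cs _ hpre
  unfold Spec_generate_py generate_py generate_py_alt
  have hpw : (PySem.List.sorted cs (fun x => x) true).Pairwise (fun a b => b ≤ a) :=
    PySem.List.sorted_pairwise_rev cs (fun x => x)
  have hnones : (nones (List.replicate ((PySem.List.sorted cs (fun x => x) true).sum).toNat
      (none : Option Int)) : Int) = max (PySem.List.sorted cs (fun x => x) true).sum 0 := by
    simp only [nones, List.countP_replicate]
    simp [Int.toNat_eq_max]
  have hfree : PySem.List.pyRange 0 (PySem.List.sorted cs (fun x => x) true).sum 1
      = blanks (List.replicate ((PySem.List.sorted cs (fun x => x) true).sum).toNat (none : Option Int)) := by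
    rw [blanks_replicate, PySem.List.pyRange_one]
    simp
  show List.map (fun o => o.getD 0)
      (outerA 0 (PySem.List.sorted cs (fun x => x) true).sum (PySem.List.sorted cs (fun x => x) true)
        (List.replicate ((PySem.List.sorted cs (fun x => x) true).sum).toNat none))
    = List.map (fun o => o.getD 0)
      (outerB 0 (PySem.List.sorted cs (fun x => x) true).sum
        (PySem.List.pyRange 0 (PySem.List.sorted cs (fun x => x) true).sum 1)
        (List.replicate ((PySem.List.sorted cs (fun x => x) true).sum).toNat none)
        (PySem.List.sorted cs (fun x => x) true))
  rw [hfree]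
  exact congrArg _ (outer_eq _ _ 0 hpw hpre hnones)
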